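-- pv_equiv track=rewrite | github.com/MatiPl01/Wstep-do-Informatyki | Kolokwia/2019_2020/Kolokwium 1/Zad2 (2).py | get_converted_matrix
-- ===== SOURCE A (Python) =====
-- def is_multiple_of_natural_number_square(num: int) -> bool:
--     n = 2
--
--     while True:
--         n_sq = n**2
--         mul = 2
--
--         if mul * n_sq > num:
--             return False
--
--         while mul * n_sq <= num:
--             if mul * n_sq == num:
--                 return True
--             mul += 1
--         n += 1
--
-- def get_converted_matrix(matrix: list) -> list:
--     new_matrix = []
--     for row_idx in range(len(matrix)):
--         row = []
--         for col_idx in range(len(matrix[row_idx])):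
--             row.append(is_multiple_of_natural_number_square(matrix[row_idx][col_idx]))
--         new_matrix.append(row)
--     return new_matrix
-- ===== SOURCE B (Python) =====
-- def get_converted_matrix(matrix: list) -> list:
--     def is_small_square_multiple(num):
--         # num == mul * n**2 with n, mul >= 2  <=>  some n >= 2 has n**2 | num and 2*n**2 <= num
--         n = 2
--         while 2 * n * n <= num:
--             if num % (n * n) == 0:
--                 return True
--             n += 1
--         return False
--     return [[is_small_square_multiple(num) for num in row] for row in matrix]
-- ===== Notes on version B (the rewrite author's own statement) =====
-- stated objective: faster
-- what changed: Per element, A scans all multiples mul*n^2 for every n (O(num) work via its nested while loops); B only iterates n while 2*n*n <= num and tests divisibility num % (n*n) == 0, and builds the result with nested comprehensions instead of index loops.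
import Mathlib
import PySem

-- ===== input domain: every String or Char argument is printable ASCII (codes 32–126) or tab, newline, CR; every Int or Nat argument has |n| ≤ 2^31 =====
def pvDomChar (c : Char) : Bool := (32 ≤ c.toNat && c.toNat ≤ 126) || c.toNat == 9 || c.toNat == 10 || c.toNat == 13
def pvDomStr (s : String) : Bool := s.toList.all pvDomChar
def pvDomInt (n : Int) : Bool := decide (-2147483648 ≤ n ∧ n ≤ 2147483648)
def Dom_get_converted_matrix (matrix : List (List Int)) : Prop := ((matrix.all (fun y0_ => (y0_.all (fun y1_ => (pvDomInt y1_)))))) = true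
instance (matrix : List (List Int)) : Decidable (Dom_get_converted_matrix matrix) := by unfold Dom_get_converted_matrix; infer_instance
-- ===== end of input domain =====

-- B replaces A's per-element scan of all multiples mul*n^2 by a divisibility test num % (n*n) == 0 for n with 2*n*n <= num (objective: faster).

-- ===== PORT A =====
-- inner 'while mul * n_sq <= num' loop of is_multiple_of_natural_number_square;
-- returns true iff it hits 'mul * n_sq == num', false when the loop exits.
-- The loop variable mul is kept as a Nat (it starts at 2 and only increments);
-- the 'n = 0' guard is a totality guard only: every call passes n ≥ 2.
def innerA (num : Int) (n mul : Nat) : Bool :=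
  if _h : n = 0 then false
  else if h2 : (mul : Int) * (n : Int) ^ 2 ≤ num then
    if (mul : Int) * (n : Int) ^ 2 = num then true
    else innerA num n (mul + 1)
  else false
termination_by (num + 1 - (mul : Int) * (n : Int) ^ 2).toNat
decreasing_by
  have hn : (1 : Int) ≤ (n : Int) := by exact_mod_cast Nat.one_le_iff_ne_zero.mpr _h
  have hsq : (1 : Int) ≤ (n : Int) ^ 2 := by nlinarith
  push_cast
  have : ((mul : Int) + 1) * (n : Int) ^ 2 = (mul : Int) * (n : Int) ^ 2 + (n : Int) ^ 2 := by ring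
  omega

-- outer 'while True' loop over n of is_multiple_of_natural_number_square
def outerA (num : Int) (n : Nat) : Bool :=
  if h : 2 * (n : Int) ^ 2 > num then false
  else if innerA num n 2 then true
  else outerA num (n + 1)
termination_by (num + 1 - 2 * (n : Int) ^ 2).toNat
decreasing_by
  have hn : (0 : Int) ≤ (n : Int) := by positivity
  have : 2 * ((n : Int) + 1) ^ 2 = 2 * (n : Int) ^ 2 + 4 * (n : Int) + 2 := by ring
  push_cast
  omega

def is_multiple_of_natural_number_square (num : Int) : Bool := outerA num 2

def get_converted_matrix (matrix : List (List Int)) : List (List Bool) :=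
  (PySem.List.pyRange 0 matrix.length 1).foldl (fun new_matrix row_idx =>
    let r := PySem.List.pyGetD matrix row_idx []
    let row := (PySem.List.pyRange 0 r.length 1).foldl (fun row col_idx =>
      row ++ [is_multiple_of_natural_number_square (PySem.List.pyGetD r col_idx 0)]) []
    new_matrix ++ [row]) []

-- ===== PORT B =====
-- B's while loop: n from 2 while 2*n*n <= num, divisibility test per n
def loopB (num : Int) (n : Nat) : Bool :=
  if h : 2 * (n : Int) * (n : Int) ≤ num then
    if PySem.Int.mod num ((n : Int) * (n : Int)) = 0 then true
    else loopB num (n + 1)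
  else false
termination_by (num + 1 - 2 * (n : Int) * (n : Int)).toNat
decreasing_by
  have hn : (0 : Int) ≤ (n : Int) := by positivity
  have : 2 * ((n : Int) + 1) * ((n : Int) + 1) = 2 * (n : Int) * (n : Int) + 4 * (n : Int) + 2 := by ring
  push_cast
  omega

def is_small_square_multiple (num : Int) : Bool := loopB num 2

def get_converted_matrix_alt (matrix : List (List Int)) : List (List Bool) :=
  matrix.map (fun row => row.map (fun num => is_small_square_multiple num))

-- ===== PRECONDITION & SPEC =====
def Spec_get_converted_matrix (matrix : List (List Int)) (out : List (List Bool)) : Prop := out = get_converted_matrix_alt matrix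
instance (matrix : List (List Int)) (out : List (List Bool)) : Decidable (Spec_get_converted_matrix matrix out) := by unfold Spec_get_converted_matrix; infer_instance

-- ===== CLAIM (what is proved, stated in full; the proofs are below) =====
def Claim_equal_get_converted_matrix : Prop := ∀ (matrix : List (List Int)), Dom_get_converted_matrix matrix → Spec_get_converted_matrix matrix (get_converted_matrix matrix)

-- ===== LEMMAS AND PROOFS =====

-- A's inner loop decides: n^2 divides num with quotient at least mul
theorem innerA_eq_fuel (num : Int) (fuel : Nat) : ∀ (n mul : Nat), n ≠ 0 →
    (num + 1 - (mul : Int) * (n : Int) ^ 2).toNat ≤ fuel →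
    (innerA num n mul = true ↔ ((n : Int) ^ 2 ∣ num ∧ (mul : Int) * (n : Int) ^ 2 ≤ num)) := by
  induction fuel with
  | zero =>
    intro n mul hn hf
    have hsq : (1 : Int) ≤ (n : Int) ^ 2 := by
      have : (1 : Int) ≤ (n : Int) := by exact_mod_cast Nat.one_le_iff_ne_zero.mpr hn
      nlinarith
    have hgt : num < (mul : Int) * (n : Int) ^ 2 := by omega
    rw [innerA]
    rw [dif_neg hn, dif_neg (by omega)]
    simp only [Bool.false_eq_true, false_iff, not_and]
    intro _; omega
  | succ fuel ih =>
    intro n mul hn hf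
    have hsq : (1 : Int) ≤ (n : Int) ^ 2 := by
      have : (1 : Int) ≤ (n : Int) := by exact_mod_cast Nat.one_le_iff_ne_zero.mpr hn
      nlinarith
    rw [innerA]
    rw [dif_neg hn]
    by_cases hle : (mul : Int) * (n : Int) ^ 2 ≤ num
    · rw [dif_pos hle]
      by_cases heq : (mul : Int) * (n : Int) ^ 2 = num
      · simp only [heq, if_true, true_iff]
        exact ⟨Dvd.intro_left _ heq, le_rfl⟩
      · rw [if_neg heq]
        have hstep : ((mul + 1 : Nat) : Int) * (n : Int) ^ 2 = (mul : Int) * (n : Int) ^ 2 + (n : Int) ^ 2 := by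
          push_cast; ring
        rw [ih n (mul + 1) hn (by omega)]
        constructor
        · rintro ⟨hd, hle'⟩; exact ⟨hd, by omega⟩
        · rintro ⟨hd, _⟩
          refine ⟨hd, ?_⟩
          obtain ⟨k, hk⟩ := hd
          -- quotient k satisfies k ≥ mul + 1 since k*n^2 = num ≥ mul*n^2 and ≠ mul*n^2
          have hk' : num = k * (n : Int) ^ 2 := by rw [hk]; ring
          have hkge : (mul : Int) + 1 ≤ k := by
            by_contra hlt
            push Not at hlt
            have h1 : k * (n : Int) ^ 2 ≤ (mul : Int) * (n : Int) ^ 2 :=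
              mul_le_mul_of_nonneg_right (by omega) (by positivity)
            exact heq (le_antisymm hle (by linarith))
          have h2 : ((mul : Int) + 1) * (n : Int) ^ 2 ≤ k * (n : Int) ^ 2 :=
            mul_le_mul_of_nonneg_right hkge (by positivity)
          have hexp : ((mul : Int) + 1) * (n : Int) ^ 2 = (mul : Int) * (n : Int) ^ 2 + (n : Int) ^ 2 := by ring
          rw [hstep]; linarith
    · rw [dif_neg hle]
      simp only [Bool.false_eq_true, false_iff, not_and]
      intro _; exact hle

theorem innerA_eq (num : Int) (n mul : Nat) (hn : n ≠ 0) :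
    (innerA num n mul = true ↔ ((n : Int) ^ 2 ∣ num ∧ (mul : Int) * (n : Int) ^ 2 ≤ num)) :=
  innerA_eq_fuel num (num + 1 - (mul : Int) * (n : Int) ^ 2).toNat n mul hn le_rfl

theorem outerA_eq_loopB_fuel (num : Int) (fuel : Nat) : ∀ (n : Nat), 2 ≤ n →
    (num + 1 - 2 * (n : Int) ^ 2).toNat ≤ fuel → outerA num n = loopB num n := by
  induction fuel with
  | zero =>
    intro n hn hf
    have hgt : num < 2 * (n : Int) ^ 2 := by
      have : (0 : Int) ≤ (n : Int) ^ 2 := by positivity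
      omega
    rw [outerA, loopB]
    rw [dif_pos (by omega)]
    rw [dif_neg (by nlinarith)]
  | succ fuel ih =>
    intro n hn hf
    rw [outerA, loopB]
    by_cases hle : 2 * (n : Int) ^ 2 ≤ num
    · rw [dif_neg (by omega), dif_pos (by nlinarith)]
      have hnz : n ≠ 0 := by omega
      have hsq : (n : Int) * (n : Int) = (n : Int) ^ 2 := by ring
      by_cases hd : (n : Int) ^ 2 ∣ num
      · have ht : innerA num n 2 = true := (innerA_eq num n 2 hnz).mpr ⟨hd, by push_cast; omega⟩
        have hmod : PySem.Int.mod num ((n : Int) * (n : Int)) = 0 := by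
          rw [PySem.Int.mod_eq_zero_iff_dvd, hsq]; exact hd
        rw [ht, if_pos rfl, if_pos hmod]
      · have ht : innerA num n 2 = false := by
          rw [Bool.eq_false_iff]
          intro hc
          exact hd ((innerA_eq num n 2 hnz).mp hc).1
        have hmod : ¬ PySem.Int.mod num ((n : Int) * (n : Int)) = 0 := by
          rw [PySem.Int.mod_eq_zero_iff_dvd, hsq]; exact hd
        rw [ht, if_neg (by simp), if_neg hmod]
        have hstep : ((n + 1 : Nat) : Int) ^ 2 = (n : Int) ^ 2 + 2 * (n : Int) + 1 := by
          push_cast; ring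
        exact ih (n + 1) (by omega) (by omega)
    · rw [dif_pos (by omega), dif_neg (by nlinarith)]

theorem outerA_eq_loopB (num : Int) (n : Nat) (hn : 2 ≤ n) :
    outerA num n = loopB num n :=
  outerA_eq_loopB_fuel num (num + 1 - 2 * (n : Int) ^ 2).toNat n hn le_rfl

-- ===== VERDICT (by name: the statement is the Claim_ definition above) =====
theorem get_converted_matrix_spec : Claim_equal_get_converted_matrix := by
  intro matrix _
  unfold Spec_get_converted_matrix
  unfold get_converted_matrix get_converted_matrix_alt
  simp only [PySem.List.foldl_append_singleton_eq_map, List.nil_append]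
  rw [show (fun row_idx => (PySem.List.pyRange 0 ((PySem.List.pyGetD matrix row_idx ([] : List Int)).length : Int) 1).map
        (fun col_idx => is_multiple_of_natural_number_square (PySem.List.pyGetD (PySem.List.pyGetD matrix row_idx ([] : List Int)) col_idx 0)))
      = (fun r => (PySem.List.pyRange 0 (r.length : Int) 1).map
        (fun col_idx => is_multiple_of_natural_number_square (PySem.List.pyGetD r col_idx 0))) ∘ (fun i => PySem.List.pyGetD matrix i ([] : List Int))
      from rfl,
    ← List.map_map, PySem.List.map_pyGetD_pyRange_zero']
  refine List.map_congr_left (fun row _ => ?_)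
  rw [show (fun col_idx => is_multiple_of_natural_number_square (PySem.List.pyGetD row col_idx 0))
      = is_multiple_of_natural_number_square ∘ (fun j => PySem.List.pyGetD row j 0) from rfl,
    ← List.map_map, PySem.List.map_pyGetD_pyRange_zero']
  refine List.map_congr_left (fun num _ => ?_)
  exact outerA_eq_loopB num 2 (le_refl 2)
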